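-- pv_equiv track=rewrite | github.com/UP929312/CommunityAPI | bot/player_commands/lowest_bin.py | format_enchantments
-- ===== SOURCE A (Python) =====
-- def format_enchantments(enchantments: list[str]) -> str:
--     if not enchantments:
--         return ""
--     sorted_enchants = sorted(enchantments, key=lambda ench: ench.startswith("Ultimate"), reverse=True)
--
--     enchantment_pairs = [sorted_enchants[i:i + 2] for i in range(0, len(sorted_enchants), 2)]
--     if len(enchantment_pairs[-1]) == 1:
--         enchantment_pairs[-1] = (enchantment_pairs[-1][0], "")
--
--     enchantment_string = "\n".join([f"[{first.replace('_', ' ')}, {second.replace('_', ' ')}]".replace(", ]", "]") for first, second in enchantment_pairs])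
--
--     formatted_enchants = f'''```ini
-- [Enchantments]
-- {enchantment_string}
-- ```
-- '''.rstrip("\n")
--     return formatted_enchants
-- ===== SOURCE B (Python) =====
-- def format_enchantments(enchantments: list[str]) -> str:
--     if not enchantments:
--         return ""
--     # Streaming state machine: no sort, no intermediate ordered list, no pair list.
--     # Two filtered passes over the input (ultimates first, then the rest) feed a
--     # pending/emit machine that appends each finished line to the output directly.
--     out = ["```ini", "[Enchantments]"]
--     pending = None
--     for want in (True, False):
--         for e in enchantments:
--             if e.startswith("Ultimate") == want:
--                 word = e.replace("_", " ")
--                 if pending is None: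
--                     pending = word
--                 else:
--                     out.append(("[%s, %s]" % (pending, word)).replace(", ]", "]"))
--                     pending = None
--     if pending is not None:
--         out.append(("[%s, ]" % pending).replace(", ]", "]"))
--     out.append("```")
--     return "\n".join(out)
-- ===== Notes on version B (the rewrite author's own statement) =====
-- stated objective: alternative
-- what changed: Replaced A's stable bool-key reverse sort, range/slice chunking, last-pair patch and template+rstrip by a streaming pending/emit state machine: two filtered passes over the raw input (ultimates first, then the rest) feed an accumulator that appends each finished line directly, never materialising an ordered list or a pair list.
import Mathlib
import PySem

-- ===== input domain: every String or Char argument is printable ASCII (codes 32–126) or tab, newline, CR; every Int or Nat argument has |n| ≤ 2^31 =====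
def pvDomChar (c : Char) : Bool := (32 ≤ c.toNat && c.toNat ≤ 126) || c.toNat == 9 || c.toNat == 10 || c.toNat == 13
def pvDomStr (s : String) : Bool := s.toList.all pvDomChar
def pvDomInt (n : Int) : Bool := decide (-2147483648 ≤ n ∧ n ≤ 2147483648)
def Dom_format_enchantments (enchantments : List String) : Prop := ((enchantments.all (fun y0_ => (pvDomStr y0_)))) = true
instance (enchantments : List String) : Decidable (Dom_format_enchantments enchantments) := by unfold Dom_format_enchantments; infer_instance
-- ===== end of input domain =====

-- B replaces A's stable reverse sort + range/slice pairing + last-pair patch + template/rstrip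
-- by a streaming pending/emit state machine fed by two filtered passes; same output.

-- ===== PORT A =====
-- s.rstrip("\n") ported by hand (exact: drops exactly the trailing newline characters)
def pvRstripNl (cs : List Char) : List Char :=
  (cs.reverse.dropWhile (fun c => c == '\n')).reverse

-- the f-string "[{first.replace('_',' ')}, {second.replace('_',' ')}]".replace(", ]", "]")
def pvLineA (pr : List String) : List Char :=
  match pr with
  | [first, second] =>
      PySem.Chars.replace
        (['['] ++ PySem.Chars.replace first.toList ['_'] [' '] ++ [',', ' '] ++
          PySem.Chars.replace second.toList ['_'] [' '] ++ [']'])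
        [',', ' ', ']'] [']']
  | _ => []  -- unreachable: every pair has exactly two components after the fix below

-- enchantment_pairs[-1] = (enchantment_pairs[-1][0], "")  when the last pair is a singleton
def pvFixA (ps : List (List String)) : List (List String) :=
  match ps.getLast? with
  | some [x] => ps.dropLast ++ [[x, ""]]
  | _ => ps

def format_enchantments (enchantments : List String) : String :=
  if enchantments = [] then ""
  else
    let sorted_enchants :=
      PySem.List.sorted enchantments (fun ench => PySem.Str.startswith ench "Ultimate") true
    let enchantment_pairs :=
      (PySem.List.pyRange 0 (sorted_enchants.length : Int) 2).map
        (fun i => PySem.List.slice sorted_enchants (some i) (some (i + 2)))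
    let enchantment_pairs := pvFixA enchantment_pairs
    let enchantment_string := PySem.Chars.join ['\n'] (enchantment_pairs.map pvLineA)
    String.ofList
      (pvRstripNl ("```ini\n[Enchantments]\n".toList ++ enchantment_string ++ "\n```\n".toList))

-- ===== PORT B =====
-- ("[%s, %s]" % (f, s)).replace(", ]", "]")  on already-underscore-replaced words
def pvMkLine (f s : List Char) : List Char :=
  PySem.Chars.replace (['['] ++ f ++ [',', ' '] ++ s ++ [']']) [',', ' ', ']'] [']']

-- one step of the pending/emit machine for the pass selecting startswith == want
def pvStepB (want : Bool) (st : List (List Char) × Option (List Char)) (e : String) :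
    List (List Char) × Option (List Char) :=
  if PySem.Str.startswith e "Ultimate" == want then
    let word := PySem.Chars.replace e.toList ['_'] [' ']
    match st.2 with
    | none => (st.1, some word)
    | some f => (st.1 ++ [pvMkLine f word], none)
  else st

def format_enchantments_alt (enchantments : List String) : String :=
  if enchantments = [] then ""
  else
    let st0 : List (List Char) × Option (List Char) :=
      (["```ini".toList, "[Enchantments]".toList], none)
    let st1 := enchantments.foldl (pvStepB true) st0
    let st2 := enchantments.foldl (pvStepB false) st1
    let out :=
      (match st2.2 with
       | some f => st2.1 ++ [pvMkLine f []]   -- ("[%s, ]" % pending).replace(", ]", "]")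
       | none => st2.1) ++ ["```".toList]
    String.ofList (PySem.Chars.join ['\n'] out)

-- ===== PRECONDITION & SPEC =====
def Spec_format_enchantments (enchantments : List String) (out : String) : Prop := out = format_enchantments_alt enchantments
instance (enchantments : List String) (out : String) : Decidable (Spec_format_enchantments enchantments out) := by unfold Spec_format_enchantments; infer_instance

-- ===== CLAIM (what is proved, stated in full; the proofs are below) =====
def Claim_equal_format_enchantments : Prop := ∀ (enchantments : List String), Dom_format_enchantments enchantments → Spec_format_enchantments enchantments (format_enchantments enchantments)

-- ===== LEMMAS AND PROOFS =====

-- proof-only helpers: the common normal form both sides are reduced to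
def pvLineB (first second : String) : List Char :=
  pvMkLine (PySem.Chars.replace first.toList ['_'] [' '])
    (PySem.Chars.replace second.toList ['_'] [' '])

def pvPairLines : List String → List (List Char)
  | [] => []
  | [x] => [pvLineB x ""]
  | x :: y :: rest => pvLineB x y :: pvPairLines rest

-- A's chunking, named for the proof: the range/slice pairing produces the two-at-a-time chunks
def pvChunks : List String → List (List String)
  | [] => []
  | [x] => [[x]]
  | x :: y :: rest => [x, y] :: pvChunks rest

theorem insertBy_partitioned (p : String → Bool) (x : String) (us vs : List String)
    (hu : ∀ u ∈ us, p u = true) (hv : ∀ v ∈ vs, p v = false) :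
    PySem.List.insertBy (fun a b => decide (p b < p a)) x (us ++ vs) =
      if p x then us ++ [x] ++ vs else us ++ vs ++ [x] := by
  induction us with
  | nil =>
    simp only [List.nil_append]
    induction vs with
    | nil => simp [PySem.List.insertBy]
    | cons v vs ih =>
      have hv0 : p v = false := hv v (by simp)
      cases hx : p x with
      | true => simp [PySem.List.insertBy, hv0, hx]
      | false =>
        simp only [PySem.List.insertBy, hv0, hx]
        simpa [hx] using ih (fun w hw => hv w (by simp [hw]))
  | cons u us ih =>
    have hu0 : p u = true := hu u (by simp)
    have := ih (fun w hw => hu w (by simp [hw]))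
    cases hx : p x <;>
      simp_all [PySem.List.insertBy]

theorem sorted_rev_bool_eq_partition (p : String → Bool) (xs : List String) :
    PySem.List.sorted xs p true = xs.filter p ++ xs.filter (fun x => !p x) := by
  rw [PySem.List.sorted_rev_eq_foldl_insertBy]
  suffices h : ∀ (l us vs : List String), (∀ u ∈ us, p u = true) → (∀ v ∈ vs, p v = false) →
      l.foldl (fun acc x => PySem.List.insertBy (fun a b => decide (p b < p a)) x acc) (us ++ vs) =
        (us ++ l.filter p) ++ (vs ++ l.filter (fun x => !p x)) by
    simpa using h xs [] [] (by simp) (by simp)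
  intro l
  induction l with
  | nil => intro us vs _ _; simp
  | cons x t ih =>
    intro us vs hu hv
    simp only [List.foldl_cons, insertBy_partitioned p x us vs hu hv]
    cases hx : p x with
    | true =>
      rw [if_pos rfl]
      have := ih (us ++ [x]) vs
        (by intro u hum; rcases List.mem_append.1 hum with h | h
            · exact hu u h
            · simp at h; simpa [h])
        hv
      simpa [List.filter_cons, hx, List.append_assoc] using this
    | false =>
      rw [if_neg (by simp)]
      have := ih us (vs ++ [x]) hu
        (by intro v hvm; rcases List.mem_append.1 hvm with h | h
            · exact hv v h
            · simp at h; simpa [h])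
      simpa [List.filter_cons, hx, List.append_assoc] using this

theorem chunk_nat (l : List String) :
    (List.range ((l.length + 1) / 2)).map (fun k => (l.drop (2 * k)).take 2) = pvChunks l := by
  have hgen : ∀ (m : Nat) (l : List String), l.length = m →
      (List.range ((l.length + 1) / 2)).map (fun k => (l.drop (2 * k)).take 2) = pvChunks l := by
    intro m
    induction m using Nat.strong_induction_on with
    | _ m ih =>
      intro l hl
      match l with
      | [] => simp [pvChunks]
      | [x] => simp [pvChunks, List.range_succ]
      | x :: y :: r =>
        have hc : ((x :: y :: r).length + 1) / 2 = (r.length + 1) / 2 + 1 := by simp only [List.length_cons]; omega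
        rw [hc, List.range_succ_eq_map, List.map_cons, List.map_map]
        have hrec := ih r.length (by simp only [List.length_cons] at hl; omega) r rfl
        simp only [pvChunks]
        refine List.cons_eq_cons.mpr ⟨by simp, ?_⟩
        rw [← hrec]
        apply List.map_congr_left
        intro k _
        simp only [Function.comp_apply]
        rw [show 2 * Nat.succ k = 2 * k + 1 + 1 from by omega]
        simp [List.drop_succ_cons]
  exact hgen l.length l rfl

theorem chunks_eq (l : List String) :
    (PySem.List.pyRange 0 (l.length : Int) 2).map
        (fun i => PySem.List.slice l (some i) (some (i + 2))) = pvChunks l := by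
  rw [PySem.List.pyRange_of_pos 0 (l.length : Int) (by norm_num), List.map_map]
  have hcnt : (if (0:Int) < (l.length : Int) then (((l.length : Int) - 0 + 2 - 1) / 2).toNat else 0)
      = (l.length + 1) / 2 := by
    split_ifs with h <;> omega
  rw [hcnt, ← chunk_nat l]
  apply List.map_congr_left
  intro k _
  simp only [Function.comp_apply]
  have h1 : (0:Int) + 2 * (k : Int) = ((2 * k : Nat) : Int) := by push_cast; ring
  rw [h1]
  have h2 : ((2 * k : Nat) : Int) + 2 = ((2 * k : Nat) : Int) + ((2 : Nat) : Int) := by norm_num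
  rw [h2, PySem.List.slice_natCast_add]

theorem fixA_cons_pair (x y : String) (ps : List (List String)) :
    pvFixA ([x, y] :: ps) = [x, y] :: pvFixA ps := by
  cases ps with
  | nil => simp [pvFixA]
  | cons p ps' =>
    simp only [pvFixA, List.getLast?_cons_cons]
    split <;> simp_all

theorem lines_eq (l : List String) :
    (pvFixA (pvChunks l)).map pvLineA = pvPairLines l := by
  have hgen : ∀ (m : Nat) (l : List String), l.length = m →
      (pvFixA (pvChunks l)).map pvLineA = pvPairLines l := by
    intro m
    induction m using Nat.strong_induction_on with
    | _ m ih =>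
      intro l hl
      match l with
      | [] => simp [pvChunks, pvFixA, pvPairLines]
      | [x] => simp [pvChunks, pvFixA, pvPairLines, pvLineA, pvLineB, pvMkLine]
      | x :: y :: r =>
        rw [pvChunks, fixA_cons_pair, List.map_cons,
          ih r.length (by simp only [List.length_cons] at hl; omega) r rfl]
        rfl
  exact hgen l.length l rfl

theorem rstrip_template (b : List Char) :
    pvRstripNl (b ++ ['\n', '`', '`', '`', '\n']) = b ++ ['\n', '`', '`', '`'] := by
  simp [pvRstripNl, List.dropWhile]

-- ===== B-side lemmas =====

-- the unfiltered machine step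
def pvStep (st : List (List Char) × Option (List Char)) (e : String) :
    List (List Char) × Option (List Char) :=
  let word := PySem.Chars.replace e.toList ['_'] [' ']
  match st.2 with
  | none => (st.1, some word)
  | some f => (st.1 ++ [pvMkLine f word], none)

def pvFin (st : List (List Char) × Option (List Char)) : List (List Char) :=
  match st.2 with
  | some f => st.1 ++ [pvMkLine f []]
  | none => st.1

-- remaining lines as a function of the pending word and the items still to feed
def pvT : Option (List Char) → List String → List (List Char)
  | none, [] => []
  | some f, [] => [pvMkLine f []]
  | none, x :: xs => pvT (some (PySem.Chars.replace x.toList ['_'] [' '])) xs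
  | some f, x :: xs => pvMkLine f (PySem.Chars.replace x.toList ['_'] [' ']) :: pvT none xs

theorem foldl_stepB_filter (want : Bool) (l : List String)
    (st : List (List Char) × Option (List Char)) :
    l.foldl (pvStepB want) st =
      (l.filter (fun e => PySem.Str.startswith e "Ultimate" == want)).foldl pvStep st := by
  induction l generalizing st with
  | nil => rfl
  | cons x t ih =>
    rw [List.foldl_cons, List.filter_cons]
    by_cases hx : (PySem.Str.startswith x "Ultimate" == want) = true
    · rw [if_pos hx, List.foldl_cons, ih]
      congr 1
      unfold pvStepB pvStep
      rw [if_pos hx]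
    · rw [if_neg hx, ih]
      congr 1
      unfold pvStepB
      rw [if_neg hx]

theorem fin_foldl_step (l : List String) (acc : List (List Char)) (p : Option (List Char)) :
    pvFin (l.foldl pvStep (acc, p)) = acc ++ pvT p l := by
  induction l generalizing acc p with
  | nil => cases p <;> simp [pvFin, pvT]
  | cons x t ih =>
    cases p with
    | none => simpa [pvStep, pvT] using ih acc _
    | some f => simpa [pvStep, pvT, List.append_assoc] using ih (acc ++ [pvMkLine f _]) none

theorem pvT_none_eq_pairLines (l : List String) : pvT none l = pvPairLines l := by
  have hgen : ∀ (m : Nat) (l : List String), l.length = m → pvT none l = pvPairLines l := by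
    intro m
    induction m using Nat.strong_induction_on with
    | _ m ih
    intro l hl
    match l with
    | [] => rfl
    | [x] =>
      have hrep : PySem.Chars.replace ([] : List Char) ['_'] [' '] = [] := by decide
      simp [pvT, pvPairLines, pvLineB, hrep]
    | x :: y :: r =>
      rw [show pvT none (x :: y :: r) =
            pvMkLine (PySem.Chars.replace x.toList ['_'] [' '])
              (PySem.Chars.replace y.toList ['_'] [' ']) :: pvT none r from rfl,
        ih r.length (by simp only [List.length_cons] at hl; omega) r rfl]
      rfl
  exact hgen l.length l rfl

theorem pairLines_ne_nil (l : List String) (h : l ≠ []) : pvPairLines l ≠ [] := by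
  match l with
  | [x] => simp [pvPairLines]
  | x :: y :: r => simp [pvPairLines]

theorem join_append_singleton (sep t : List Char) (ls : List (List Char)) (h : ls ≠ []) :
    PySem.Chars.join sep (ls ++ [t]) = PySem.Chars.join sep ls ++ sep ++ t := by
  induction ls with
  | nil => simp at h
  | cons x ls ih =>
    cases ls with
    | nil => simp [PySem.Chars.join_cons_cons, PySem.Chars.join_singleton, List.append_assoc]
    | cons y ls' =>
      have h2 := ih (by simp)
      rw [List.cons_append] at h2
      rw [List.cons_append, List.cons_append, PySem.Chars.join_cons_cons, h2,
        PySem.Chars.join_cons_cons]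
      simp [List.append_assoc]

theorem join_cons_append_singleton (sep h t : List Char) (ls : List (List Char)) (hne : ls ≠ []) :
    PySem.Chars.join sep (h :: (ls ++ [t])) =
      h ++ sep ++ PySem.Chars.join sep ls ++ sep ++ t := by
  have h2 := join_append_singleton sep t ls hne
  cases ls with
  | nil => simp at hne
  | cons a l' =>
    rw [List.cons_append] at h2 ⊢
    rw [PySem.Chars.join_cons_cons, h2]
    simp [List.append_assoc]

theorem filter_not_via_beq (l : List String) :
    l.filter (fun e => PySem.Str.startswith e "Ultimate" == false) =
      l.filter (fun e => !PySem.Str.startswith e "Ultimate") := by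
  apply List.filter_congr
  intro x _
  cases PySem.Str.startswith x "Ultimate" <;> rfl

theorem filter_via_beq (l : List String) :
    l.filter (fun e => PySem.Str.startswith e "Ultimate" == true) =
      l.filter (fun e => PySem.Str.startswith e "Ultimate") := by
  apply List.filter_congr
  intro x _
  cases PySem.Str.startswith x "Ultimate" <;> rfl

-- ===== VERDICT (by name: the statement is the Claim_ definition above) =====
theorem format_enchantments_spec : Claim_equal_format_enchantments := by
  intro enchantments _
  unfold Spec_format_enchantments
  by_cases h : enchantments = []
  · simp [format_enchantments, format_enchantments_alt, h]
  · set ult := enchantments.filter (fun e => PySem.Str.startswith e "Ultimate") with hult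
    set rest := enchantments.filter (fun e => !PySem.Str.startswith e "Ultimate") with hrest
    have hne : ult ++ rest ≠ [] := by
      intro hc
      cases enchantments with
      | nil => exact h rfl
      | cons x t =>
        have hx : x ∈ ult ++ rest := by
          by_cases hx0 : PySem.Str.startswith x "Ultimate" = true
          · exact List.mem_append_left _
              (by rw [hult]; exact List.mem_filter.mpr ⟨List.mem_cons_self, hx0⟩)
          · have hx1 : PySem.Str.startswith x "Ultimate" = false := by
              revert hx0; cases PySem.Str.startswith x "Ultimate" <;> simp
            exact List.mem_append_right _
              (by rw [hrest]
                  exact List.mem_filter.mpr ⟨List.mem_cons_self, by simpa using hx1⟩)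
        rw [hc] at hx
        simp at hx
    have hLne : pvPairLines (ult ++ rest) ≠ [] := pairLines_ne_nil _ hne
    -- A side
    have hA : format_enchantments enchantments =
        String.ofList ("```ini\n[Enchantments]\n".toList ++
          PySem.Chars.join ['\n'] (pvPairLines (ult ++ rest)) ++ "\n```".toList) := by
      simp only [format_enchantments, if_neg h]
      rw [sorted_rev_bool_eq_partition, chunks_eq, lines_eq, ← hult, ← hrest]
      congr 1
      have h5 : "\n```\n".toList = ['\n', '`', '`', '`', '\n'] := by decide
      rw [h5, rstrip_template]
      have h4 : "\n```".toList = ['\n', '`', '`', '`'] := by decide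
      rw [h4, List.append_assoc]
    -- B side
    have hB : format_enchantments_alt enchantments =
        String.ofList (PySem.Chars.join ['\n']
          (("```ini".toList :: "[Enchantments]".toList :: pvPairLines (ult ++ rest)) ++
            ["```".toList])) := by
      simp only [format_enchantments_alt, if_neg h]
      rw [foldl_stepB_filter, foldl_stepB_filter, ← List.foldl_append,
        filter_via_beq, filter_not_via_beq, ← hult, ← hrest]
      have hm : (match (List.foldl pvStep
            (["```ini".toList, "[Enchantments]".toList], none) (ult ++ rest)).2 with
          | some f => (List.foldl pvStep
              (["```ini".toList, "[Enchantments]".toList], (none : Option (List Char)))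
              (ult ++ rest)).1 ++ [pvMkLine f []]
          | none => (List.foldl pvStep
              (["```ini".toList, "[Enchantments]".toList], (none : Option (List Char)))
              (ult ++ rest)).1) =
          pvFin (List.foldl pvStep (["```ini".toList, "[Enchantments]".toList], none)
            (ult ++ rest)) := by
        rfl
      rw [hm, fin_foldl_step, pvT_none_eq_pairLines]
      rfl
    rw [hA, hB]
    congr 1
    rw [List.cons_append, List.cons_append, PySem.Chars.join_cons_cons,
      join_cons_append_singleton _ _ _ _ hLne]
    have h1 : "```ini\n[Enchantments]\n".toList =
        "```ini".toList ++ ['\n'] ++ ("[Enchantments]".toList ++ ['\n']) := by decide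
    have h2 : "\n```".toList = ['\n'] ++ "```".toList := by decide
    rw [h1, h2]
    simp [List.append_assoc]
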